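-- pv_equiv track=rewrite | github.com/guna29/hireagent | src/hireagent/latex_renderer.py | apply_bullets
-- ===== SOURCE A (Python) =====
-- from typing import List, Tuple
--
-- _LATEX_ESCAPE_MAP = {
--     "\\": r"\textbackslash{}",
--     "&": r"\&",
--     "%": r"\%",
--     "$": r"\$",
--     "#": r"\#",
--     "_": r"\_",
--     "{": r"\{",
--     "}": r"\}",
--     "~": r"\textasciitilde{}",
--     "^": r"\textasciicircum{}",
-- }
--
-- def escape_latex_text(text: str) -> str:
--     cleaned = " ".join((text or "").split())
--     # Normalize common unicode punctuation that can break latex compilation.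
--     cleaned = (
--         cleaned.replace("\u2013", "-")
--         .replace("\u2014", "-")
--         .replace("\u2018", "'")
--         .replace("\u2019", "'")
--         .replace("\u201c", '"')
--         .replace("\u201d", '"')
--     )
--     return "".join(_LATEX_ESCAPE_MAP.get(ch, ch) for ch in cleaned)
--
-- def apply_bullets(tex: str, new_bullets: List[str]) -> str:
--     lines = tex.splitlines()
--     out_lines = []
--     bullet_iter = iter(new_bullets)
--     for line in lines:
--         stripped = line.strip()
--         if stripped.startswith("\\item"):
--             try:
--                 replacement = next(bullet_iter)
--             except StopIteration as exc:
--                 raise ValueError("More bullet lines in template than provided replacements") from exc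
--             out_lines.append("    \\item " + escape_latex_text(replacement))
--         else:
--             out_lines.append(line)
--     try:
--         next(bullet_iter)
--         raise ValueError("More replacements provided than bullet lines in template")
--     except StopIteration:
--         pass
--     return "\n".join(out_lines)
-- ===== SOURCE B (Python) =====
-- from typing import List
--
-- _LATEX_ESCAPE_MAP = {
--     "\\": r"\textbackslash{}",
--     "&": r"\&",
--     "%": r"\%",
--     "$": r"\$",
--     "#": r"\#",
--     "_": r"\_",
--     "{": r"\{",
--     "}": r"\}",
--     "~": r"\textasciitilde{}",
--     "^": r"\textasciicircum{}",
-- }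
--
-- def escape_latex_text(text: str) -> str:
--     cleaned = " ".join((text or "").split())
--     cleaned = (
--         cleaned.replace("\u2013", "-")
--         .replace("\u2014", "-")
--         .replace("\u2018", "'")
--         .replace("\u2019", "'")
--         .replace("\u201c", '"')
--         .replace("\u201d", '"')
--     )
--     return "".join(_LATEX_ESCAPE_MAP.get(ch, ch) for ch in cleaned)
--
-- def _split_at_item(lines):
--     """Split at the first '\\item' line: (lines before it, lines after it), or None."""
--     for k, line in enumerate(lines):
--         if line.strip().startswith("\\item"):
--             return lines[:k], lines[k + 1:]
--     return None
--
-- def apply_bullets(tex: str, new_bullets: List[str]) -> str: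
--     # Driven by the replacement list: each bullet splits the remaining template
--     # at its next '\item' line, the consumed prefix passes through unchanged.
--     lines = tex.splitlines()
--     out = []
--     for bullet in new_bullets:
--         parts = _split_at_item(lines)
--         if parts is None:
--             raise ValueError("More replacements provided than bullet lines in template")
--         pre, lines = parts
--         out += pre
--         out.append("    \\item " + escape_latex_text(bullet))
--     if _split_at_item(lines) is not None:
--         raise ValueError("More bullet lines in template than provided replacements")
--     out += lines
--     return "\n".join(out)
-- ===== Notes on version B (the rewrite author's own statement) =====
-- stated objective: alternative
-- what changed: B is driven by the replacement list instead of the line list: each bullet splits the remaining template at its next \item line (prefix passes through, the item line is replaced), with a final split check for leftover items, instead of A's single pass over all lines consuming an iterator of bullets.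
import Mathlib
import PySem

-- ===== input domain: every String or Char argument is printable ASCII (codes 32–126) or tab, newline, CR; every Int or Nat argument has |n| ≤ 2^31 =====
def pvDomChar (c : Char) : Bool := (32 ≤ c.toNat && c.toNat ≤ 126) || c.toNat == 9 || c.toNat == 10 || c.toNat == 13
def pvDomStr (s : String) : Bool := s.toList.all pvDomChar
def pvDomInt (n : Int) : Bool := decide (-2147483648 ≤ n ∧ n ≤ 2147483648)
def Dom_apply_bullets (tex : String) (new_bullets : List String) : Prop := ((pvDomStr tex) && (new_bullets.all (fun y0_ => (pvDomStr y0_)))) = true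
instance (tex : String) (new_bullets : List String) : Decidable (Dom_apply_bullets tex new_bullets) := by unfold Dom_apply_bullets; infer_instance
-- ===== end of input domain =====

-- B is driven by the replacement list instead of the line list: each bullet splits the remaining
-- template at its next \item line, instead of A's single pass over lines consuming a bullet iterator.

-- ===== PORT A =====
-- shared same-module helper escape_latex_text (Source B reuses it verbatim, so both ports call this one definition)
def latexEscapeMap : PySem.Dict String String :=
  PySem.Dict.ofList [("\\", "\\textbackslash{}"), ("&", "\\&"), ("%", "\\%"), ("$", "\\$"),
    ("#", "\\#"), ("_", "\\_"), ("{", "\\{"), ("}", "\\}"),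
    ("~", "\\textasciitilde{}"), ("^", "\\textasciicircum{}")]

def escapeLatexText (text : String) : String :=
  -- " ".join((text or "").split()); `text or ""` returns text itself unless text = "", when both are ""
  let cleaned := PySem.Str.join " " (PySem.Str.split₀ text)
  let cleaned := PySem.Str.replace (PySem.Str.replace (PySem.Str.replace (PySem.Str.replace
    (PySem.Str.replace (PySem.Str.replace cleaned "\u2013" "-") "\u2014" "-")
    "\u2018" "'") "\u2019" "'") "\u201c" "\"") "\u201d" "\""
  PySem.Str.join "" (cleaned.toList.map (fun ch => PySem.Dict.getD latexEscapeMap (String.singleton ch) (String.singleton ch)))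

def aStep (st : List String × List String) (line : String) : List String × List String :=
  if PySem.Str.startswith (PySem.Str.strip line) "\\item" then
    match st.2 with
    | b :: rest => (st.1 ++ ["    \\item " ++ escapeLatexText b], rest)
    | [] => (st.1, [])   -- here Python raises ValueError (iterator exhausted); excluded by Pre_
  else (st.1 ++ [line], st.2)

def apply_bullets (tex : String) (new_bullets : List String) : String :=
  let lines := PySem.Str.splitlines tex
  let res := lines.foldl aStep ([], new_bullets)
  -- trailing next(bullet_iter): Python raises ValueError if bullets remain; excluded by Pre_
  PySem.Str.join "\n" res.1

-- ===== PORT B =====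
def isItemLine (line : String) : Bool := PySem.Str.startswith (PySem.Str.strip line) "\\item"

-- _split_at_item: (lines[:k], lines[k+1:]) at the first item line k, else None
-- (ported as structural recursion building the same prefix/suffix pair)
def splitAtItem : List String → Option (List String × List String)
  | [] => none
  | l :: ls =>
    if isItemLine l then some ([], ls)
    else (splitAtItem ls).map (fun p => (l :: p.1, p.2))

def bStep (st : List String × List String) (bullet : String) : List String × List String :=
  match splitAtItem st.2 with
  | none => (st.1, st.2)   -- here Python raises ValueError ("More replacements …"); excluded by Pre_
  | some (pre, rest) => (st.1 ++ pre ++ ["    \\item " ++ escapeLatexText bullet], rest)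

def apply_bullets_alt (tex : String) (new_bullets : List String) : String :=
  let lines := PySem.Str.splitlines tex
  let st := new_bullets.foldl bStep ([], lines)
  -- final _split_at_item check: Python raises ValueError if an item line remains; excluded by Pre_
  PySem.Str.join "\n" (st.1 ++ st.2)

-- ===== PRECONDITION & SPEC =====
-- Pre_ excludes exactly the inputs where the count of '\item' lines differs from len(new_bullets):
-- there both A and B raise ValueError (the same message for each direction of mismatch).
def Pre_apply_bullets (tex : String) (new_bullets : List String) : Prop :=
  (PySem.Str.splitlines tex).countP isItemLine = new_bullets.length
instance (tex : String) (new_bullets : List String) : Decidable (Pre_apply_bullets tex new_bullets) := by unfold Pre_apply_bullets; infer_instance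

def pvWitness_apply_bullets : String × List String := ("\\item x\ntext", ["a & b"])

def Spec_apply_bullets (tex : String) (new_bullets : List String) (out : String) : Prop := out = apply_bullets_alt tex new_bullets
instance (tex : String) (new_bullets : List String) (out : String) : Decidable (Spec_apply_bullets tex new_bullets out) := by unfold Spec_apply_bullets; infer_instance

-- ===== CLAIM (what is proved, stated in full; the proofs are below) =====
def Claim_equal_apply_bullets : Prop := ∀ (tex : String) (new_bullets : List String), Dom_apply_bullets tex new_bullets → Pre_apply_bullets tex new_bullets → Spec_apply_bullets tex new_bullets (apply_bullets tex new_bullets)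

-- ===== LEMMAS AND PROOFS =====
lemma aStep_nonitem (l : String) (h : isItemLine l = false) (acc bl : List String) :
    aStep (acc, bl) l = (acc ++ [l], bl) := by
  have h' : PySem.Str.startswith (PySem.Str.strip l) "\\item" = false := h
  unfold aStep
  rw [h']
  simp

lemma aStep_item (m : String) (h : isItemLine m = true) (acc : List String) (b : String)
    (bs : List String) :
    aStep (acc, b :: bs) m = (acc ++ ["    \\item " ++ escapeLatexText b], bs) := by
  have h' : PySem.Str.startswith (PySem.Str.strip m) "\\item" = true := h
  unfold aStep
  rw [h']
  simp

lemma foldl_aStep_no_items : ∀ (lines acc : List String),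
    lines.countP isItemLine = 0 →
    lines.foldl aStep (acc, []) = (acc ++ lines, []) := by
  intro lines
  induction lines with
  | nil => simp
  | cons l ls ih =>
    intro acc h
    have hl : isItemLine l = false := by
      rcases Bool.eq_false_or_eq_true (isItemLine l) with hb | hb
      · exfalso; rw [List.countP_cons, hb] at h; simp at h
      · exact hb
    have hls : ls.countP isItemLine = 0 := by
      rw [List.countP_cons, hl] at h; simpa using h
    rw [List.foldl_cons, aStep_nonitem l hl, ih (acc ++ [l]) hls]
    simp

lemma foldl_aStep_pre : ∀ (pre : List String), (∀ l ∈ pre, isItemLine l = false) →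
    ∀ (xs acc bl : List String),
    (pre ++ xs).foldl aStep (acc, bl) = xs.foldl aStep (acc ++ pre, bl) := by
  intro pre
  induction pre with
  | nil => intro _ xs acc bl; simp
  | cons p ps ih =>
    intro h xs acc bl
    simp only [List.cons_append, List.foldl_cons, aStep_nonitem p (h p (by simp))]
    rw [ih (fun l hl => h l (by simp [hl])) xs (acc ++ [p]) bl]
    simp

lemma splitAtItem_some : ∀ (lines pre rest : List String),
    splitAtItem lines = some (pre, rest) →
    ∃ m, lines = pre ++ m :: rest ∧ isItemLine m = true ∧ ∀ l ∈ pre, isItemLine l = false := by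
  intro lines
  induction lines with
  | nil => intro pre rest h; simp [splitAtItem] at h
  | cons l ls ih =>
    intro pre rest h
    unfold splitAtItem at h
    by_cases hl : isItemLine l
    · rw [if_pos hl] at h
      simp only [Option.some.injEq, Prod.mk.injEq] at h
      refine ⟨l, ?_, hl, ?_⟩
      · simp [← h.1, ← h.2]
      · intro x hx; rw [← h.1] at hx; simp at hx
    · rw [if_neg hl] at h
      cases hsp : splitAtItem ls with
      | none => rw [hsp] at h; simp at h
      | some p =>
        obtain ⟨p1, p2⟩ := p
        rw [hsp] at h
        simp only [Option.map_some, Option.some.injEq, Prod.mk.injEq] at h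
        obtain ⟨m, hm1, hm2, hm3⟩ := ih p1 p2 hsp
        refine ⟨m, ?_, hm2, ?_⟩
        · rw [← h.1, ← h.2, hm1]; simp
        · intro x hx
          rw [← h.1] at hx
          rcases List.mem_cons.mp hx with h' | h'
          · rw [h']; simpa using hl
          · exact hm3 x h'

lemma splitAtItem_of_count_pos : ∀ (lines : List String),
    lines.countP isItemLine ≠ 0 → ∃ pre rest, splitAtItem lines = some (pre, rest) := by
  intro lines
  induction lines with
  | nil => simp
  | cons l ls ih =>
    intro h
    by_cases hl : isItemLine l
    · exact ⟨[], ls, by simp [splitAtItem, hl]⟩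
    · have : ls.countP isItemLine ≠ 0 := by
        rw [List.countP_cons] at h
        simpa [hl] using h
      obtain ⟨pre, rest, hp⟩ := ih this
      exact ⟨l :: pre, rest, by simp [splitAtItem, hl, hp]⟩

lemma foldl_main : ∀ (bullets lines acc : List String),
    lines.countP isItemLine = bullets.length →
    (lines.foldl aStep (acc, bullets)).1
      = (bullets.foldl bStep (acc, lines)).1 ++ (bullets.foldl bStep (acc, lines)).2 := by
  intro bullets
  induction bullets with
  | nil =>
    intro lines acc h
    rw [foldl_aStep_no_items lines acc (by simpa using h)]
    simp
  | cons b bs ih =>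
    intro lines acc h
    obtain ⟨pre, rest, hsplit⟩ := splitAtItem_of_count_pos lines (by simp [h])
    obtain ⟨m, hlines, hm, hpre⟩ := splitAtItem_some lines pre rest hsplit
    have hc0 : pre.countP isItemLine = 0 :=
      List.countP_eq_zero.mpr (fun l hl => by simp [hpre l hl])
    have hcount : rest.countP isItemLine = bs.length := by
      have h' := h
      rw [hlines, List.countP_append, List.countP_cons, hc0, hm] at h'
      simp at h'
      omega
    have hb : bStep (acc, lines) b
        = (acc ++ pre ++ ["    \\item " ++ escapeLatexText b], rest) := by
      unfold bStep
      simp [hsplit]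
    calc (lines.foldl aStep (acc, b :: bs)).1
        = (rest.foldl aStep (acc ++ pre ++ ["    \\item " ++ escapeLatexText b], bs)).1 := by
          rw [hlines, foldl_aStep_pre pre hpre, List.foldl_cons, aStep_item m hm]
      _ = _ := by
          rw [List.foldl_cons, hb]
          exact ih rest (acc ++ pre ++ ["    \\item " ++ escapeLatexText b]) hcount

-- ===== VERDICT (by name: the statement is the Claim_ definition above) =====
theorem apply_bullets_spec : Claim_equal_apply_bullets := by
  intro tex new_bullets _ hpre
  unfold Spec_apply_bullets apply_bullets apply_bullets_alt
  exact congrArg (PySem.Str.join "\n")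
    (foldl_main new_bullets (PySem.Str.splitlines tex) [] hpre)
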